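-- pv_equiv track=rewrite | github.com/arshakhovhannisyannn-coder/NPUA | fsm.py | fsm
-- ===== SOURCE A (Python) =====
-- def fsm(x):
--   graph = {
--     'S0': {'a':'S1', 'b':'S0'},
--     'S1': {'a':'S1', 'b':'S2'},
--     'S2': {'a':'S1', 'b':'S3'},
--     'S3': {'a':'S1', 'b':'S0'}
--   }
--   state = 'S0'
--   for s in x:
--     if s in graph[state]:
--       state = graph[state][s]
--     else:
--       return False
--   return state == 'S3'
-- ===== SOURCE B (Python) =====
-- def fsm(x):
--   # The DFA accepts exactly strings over {a,b} ending in "abb"; check that directly.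
--   return all(c in 'ab' for c in x) and x.endswith('abb')
-- ===== Notes on version B (the rewrite author's own statement) =====
-- stated objective: simpler
-- what changed: Replaces the explicit state-machine simulation over a transition-table dict with a direct characterization of the accepted language: every character is 'a' or 'b' and the string ends with 'abb'.
import Mathlib
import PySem

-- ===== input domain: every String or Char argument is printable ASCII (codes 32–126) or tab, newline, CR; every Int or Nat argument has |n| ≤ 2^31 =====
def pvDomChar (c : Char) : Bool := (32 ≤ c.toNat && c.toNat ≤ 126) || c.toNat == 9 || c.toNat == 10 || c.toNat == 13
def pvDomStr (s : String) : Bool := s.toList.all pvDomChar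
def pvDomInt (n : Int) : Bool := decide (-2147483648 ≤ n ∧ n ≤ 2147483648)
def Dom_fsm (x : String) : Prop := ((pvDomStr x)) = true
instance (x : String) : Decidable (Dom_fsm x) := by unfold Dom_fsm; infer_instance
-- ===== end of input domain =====

-- B replaces the state-machine simulation by the language it accepts: all chars in {a,b} and the string ends with "abb" (simpler).

-- ===== PORT A =====
-- the transition-table dict of A, ported by hand as a function (exact: the four states and
-- the keys 'a','b' are the literal entries of the dict; a missing key is `none`)
def fsmTrans (st : String) (c : Char) : Option String :=
  if st == "S0" then (if c == 'a' then some "S1" else if c == 'b' then some "S0" else none)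
  else if st == "S1" then (if c == 'a' then some "S1" else if c == 'b' then some "S2" else none)
  else if st == "S2" then (if c == 'a' then some "S1" else if c == 'b' then some "S3" else none)
  else if st == "S3" then (if c == 'a' then some "S1" else if c == 'b' then some "S0" else none)
  else none

def fsmLoop : List Char → String → Bool
  | [], st => st == "S3"
  | c :: rest, st =>
    match fsmTrans st c with
    | some st' => fsmLoop rest st'
    | none => false

def fsm (x : String) : Bool := fsmLoop x.toList "S0"

-- ===== PORT B =====
def fsm_alt (x : String) : Bool :=
  (x.toList.all fun c => c == 'a' || c == 'b') && PySem.Str.endswith x "abb"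

-- ===== PRECONDITION & SPEC =====
def Spec_fsm (x : String) (out : Bool) : Prop := out = fsm_alt x
instance (x : String) (out : Bool) : Decidable (Spec_fsm x out) := by unfold Spec_fsm; infer_instance

-- ===== CLAIM (what is proved, stated in full; the proofs are below) =====
def Claim_equal_fsm : Prop := ∀ (x : String), Dom_fsm x → Spec_fsm x (fsm x)

-- ===== LEMMAS AND PROOFS =====

def allok (l : List Char) : Bool := l.all fun c => c == 'a' || c == 'b'

def ends3 (l : List Char) : Bool := l.reverse.take 3 == ['b', 'b', 'a']

-- the suffix of "abb" matched so far when the DFA is in state st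
def preSt : String → List Char
  | "S1" => ['a']
  | "S2" => ['a', 'b']
  | "S3" => ['a', 'b', 'b']
  | _ => []

def smallL : List (List Char) :=
  [[], ['a'], ['b'], ['a','a'], ['a','b'], ['b','a'], ['b','b']]

lemma ends3_append_ge (p l : List Char) (h : 3 ≤ l.length) :
    ends3 (p ++ l) = ends3 l := by
  unfold ends3
  rw [List.reverse_append, List.take_append_of_le_length (by simpa using h)]

lemma small_lists (cs : List Char) (h1 : cs.length ≤ 2) (h2 : allok cs = true) :
    cs ∈ smallL := by
  match cs with
  | [] => simp [smallL]
  | [x] =>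
    simp [allok] at h2
    rcases h2 with h | h <;> subst h <;> simp [smallL]
  | [x, y] =>
    simp [allok] at h2
    rcases h2 with ⟨hx | hx, hy | hy⟩ <;> subst hx <;> subst hy <;> simp [smallL]
  | _ :: _ :: _ :: _ => simp at h1

lemma ends3_shift (p q : List Char)
    (h : ∀ cs' ∈ smallL, ends3 (p ++ cs') = ends3 (q ++ cs'))
    (cs : List Char) (hok : allok cs = true) :
    ends3 (p ++ cs) = ends3 (q ++ cs) := by
  by_cases h3 : 3 ≤ cs.length
  · rw [ends3_append_ge p cs h3, ends3_append_ge q cs h3]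
  · exact h cs (small_lists cs (by omega) hok)

-- one cons step of the invariant: from state st with pre-history p, a valid char leads to
-- state st' with pre-history q = p ++ [c], and ends3 only depends on the DFA state
lemma key_step (cs : List Char) (st' : String) (p q : List Char)
    (hIH : fsmLoop cs st' = (allok cs && ends3 (p ++ cs)))
    (h : ∀ cs' ∈ smallL, ends3 (p ++ cs') = ends3 (q ++ cs')) :
    fsmLoop cs st' = (allok cs && ends3 (q ++ cs)) := by
  rw [hIH]
  cases hok : allok cs with
  | false => simp
  | true => rw [ends3_shift p q h cs hok]

lemma allok_cons_valid (c : Char) (cs : List Char) (h : c = 'a' ∨ c = 'b') :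
    allok (c :: cs) = allok cs := by
  rcases h with h | h <;> subst h <;> simp [allok]

lemma key (cs : List Char) : ∀ st ∈ (["S0", "S1", "S2", "S3"] : List String),
    fsmLoop cs st = (allok cs && ends3 (preSt st ++ cs)) := by
  induction cs with
  | nil =>
    intro st hst
    fin_cases hst <;> decide
  | cons c cs ih =>
    have ih0 := ih "S0" (by simp)
    have ih1 := ih "S1" (by simp)
    have ih2 := ih "S2" (by simp)
    have ih3 := ih "S3" (by simp)
    intro st hst
    by_cases ha : c = 'a'
    · subst ha
      fin_cases hst <;>
        rw [List.append_cons, allok_cons_valid 'a' cs (Or.inl rfl)]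
      · show fsmLoop cs "S1" = _
        exact key_step cs "S1" (preSt "S1") (preSt "S0" ++ ['a']) ih1 (by decide)
      · show fsmLoop cs "S1" = _
        exact key_step cs "S1" (preSt "S1") (preSt "S1" ++ ['a']) ih1 (by decide)
      · show fsmLoop cs "S1" = _
        exact key_step cs "S1" (preSt "S1") (preSt "S2" ++ ['a']) ih1 (by decide)
      · show fsmLoop cs "S1" = _
        exact key_step cs "S1" (preSt "S1") (preSt "S3" ++ ['a']) ih1 (by decide)
    · by_cases hb : c = 'b'
      · subst hb
        fin_cases hst <;>
          rw [List.append_cons, allok_cons_valid 'b' cs (Or.inr rfl)]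
        · show fsmLoop cs "S0" = _
          exact key_step cs "S0" (preSt "S0") (preSt "S0" ++ ['b']) ih0 (by decide)
        · show fsmLoop cs "S2" = _
          exact key_step cs "S2" (preSt "S2") (preSt "S1" ++ ['b']) ih2 (by decide)
        · show fsmLoop cs "S3" = _
          exact key_step cs "S3" (preSt "S3") (preSt "S2" ++ ['b']) ih3 (by decide)
        · show fsmLoop cs "S0" = _
          exact key_step cs "S0" (preSt "S0") (preSt "S3" ++ ['b']) ih0 (by decide)
      · have hok : allok (c :: cs) = false := by
          simp [allok, List.all_cons, ha, hb]
        fin_cases hst <;>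
          · rw [hok]
            simp only [Bool.false_and]
            simp [fsmLoop, fsmTrans, ha, hb]

lemma ends3_eq_endswith (l : List Char) :
    ends3 l = PySem.Chars.endswith l ['a', 'b', 'b'] := by
  rcases h : PySem.Chars.endswith l ['a', 'b', 'b'] with _ | _
  · rcases he : ends3 l with _ | _
    · rfl
    · exfalso
      have hsuf : ['a', 'b', 'b'] <:+ l := by
        unfold ends3 at he
        rw [beq_iff_eq] at he
        have hpre : (['a','b','b'] : List Char).reverse <+: l.reverse := by
          rw [List.prefix_iff_eq_take]
          simpa using he.symm
        simpa using List.reverse_prefix.mp hpre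
      rw [← PySem.Chars.endswith_iff l ['a', 'b', 'b']] at hsuf
      simp [h] at hsuf
  · have hsuf : ['a', 'b', 'b'] <:+ l := (PySem.Chars.endswith_iff l ['a', 'b', 'b']).mp h
    have hpre : (['a','b','b'] : List Char).reverse <+: l.reverse := by
      rw [List.reverse_prefix]; simpa using hsuf
    rw [List.prefix_iff_eq_take] at hpre
    unfold ends3
    rw [beq_iff_eq]
    simpa using hpre.symm

-- ===== VERDICT (by name: the statement is the Claim_ definition above) =====
theorem fsm_spec : Claim_equal_fsm := by
  intro x _
  unfold Spec_fsm fsm fsm_alt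
  rw [key x.toList "S0" (by simp)]
  have h1 : preSt "S0" ++ x.toList = x.toList := by simp [preSt]
  rw [h1, ends3_eq_endswith]
  simp [allok, PySem.Str.endswith_eq]
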